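-- pv_equiv track=rewrite | github.com/vmware/container-service-extension | container_service_extension/mqi/mqtt_extension_manager.py | _get_id_from_extension_link
-- ===== SOURCE A (Python) =====
-- def _get_id_from_extension_link(ext_link):
--     """Get the id from an extension link.
--
--     Expects the id to come after the "/extension/service/" parts of
--         the link
--     Example ext_link: '/admin/extension/service/12345/'
--     Example return: '12345'
--
--     :param str ext_link: the extension link to extract the id from
--
--     :return: the extension id
--     :rtype: str
--     """
--     link_dirs = ext_link.split('/')
--     num_dirs = len(link_dirs)
--     ind = 0
--     while ind < num_dirs:
--         # Ensure that the id comes after /extension/service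
--         if link_dirs[ind] == 'extension' and ind < num_dirs - 2 and \
--                 link_dirs[ind + 1] == 'service':
--             return link_dirs[ind + 2]
--         ind += 1
--     return ''
-- ===== SOURCE B (Python) =====
-- def _get_id_from_extension_link(ext_link):
--     """Scan the raw string for a boundary-anchored 'extension/service/' marker
--     instead of splitting into segments: the id is what follows up to the next '/'."""
--     marker = 'extension/service/'
--     n = len(marker)
--     i = 0
--     while i <= len(ext_link) - n:
--         if (i == 0 or ext_link[i - 1] == '/') and ext_link[i:i + n] == marker:
--             rest = ext_link[i + n:]
--             j = rest.find('/')
--             return rest if j == -1 else rest[:j]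
--         i += 1
--     return ''
-- ===== Notes on version B (the rewrite author's own statement) =====
-- stated objective: alternative
-- what changed: B never splits the link: it scans the raw string for the first boundary-anchored occurrence of the literal marker 'extension/service/' (at position 0 or right after a '/') and returns the characters that follow up to the next '/', instead of A's split('/') followed by an index-managed scan over the segment list.
import Mathlib
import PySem

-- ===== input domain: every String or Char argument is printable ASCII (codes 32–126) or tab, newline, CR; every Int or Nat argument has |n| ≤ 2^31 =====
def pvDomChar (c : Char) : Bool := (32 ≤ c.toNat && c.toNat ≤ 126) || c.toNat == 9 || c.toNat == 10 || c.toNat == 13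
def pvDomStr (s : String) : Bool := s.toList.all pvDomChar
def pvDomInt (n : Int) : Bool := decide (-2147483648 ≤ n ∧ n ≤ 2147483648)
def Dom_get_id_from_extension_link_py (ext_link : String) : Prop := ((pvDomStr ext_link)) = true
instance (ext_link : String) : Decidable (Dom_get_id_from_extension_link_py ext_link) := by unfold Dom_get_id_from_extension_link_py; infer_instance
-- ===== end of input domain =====

-- B does not split the link at all: it scans the raw string for the first boundary-anchored
-- occurrence of the marker 'extension/service/' and returns what follows up to the next '/';
-- an alternative algorithm of the same cost (A splits on '/' and scans the segment list).

-- ===== PORT A =====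
-- A's while loop: `ind` walks the split list; indexing is always in range when
-- evaluated (short-circuit guards), so `.getD ""` never supplies its default.
def aLoop (segs : List String) (ind : Nat) : String :=
  if ind < segs.length then
    if ((PySem.List.pyGet? segs (ind : Int)).getD "" == "extension"
        && decide (ind < segs.length - 2)
        && (PySem.List.pyGet? segs ((ind : Int) + 1)).getD "" == "service") then
      (PySem.List.pyGet? segs ((ind : Int) + 2)).getD ""
    else aLoop segs (ind + 1)
  else ""
termination_by segs.length - ind

-- split('/') with a nonempty separator never raises: split? is always `some` here.
def get_id_from_extension_link_py (ext_link : String) : String :=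
  aLoop ((PySem.Str.split? ext_link "/").getD []) 0

-- ===== PORT B =====
-- marker = 'extension/service/' as its character list
def pvMarker : List Char := ['e', 'x', 't', 'e', 'n', 's', 'i', 'o', 'n', '/', 's', 'e', 'r', 'v', 'i', 'c', 'e', '/']

-- Source B's while loop over character positions i (the guard `i <= len(s) - n` of Python
-- is `i + n ≤ len s` here since i ≥ 0); `ext_link[i-1]` is evaluated only when i ≠ 0,
-- so the `.getD ' '` default is never used.
def bLoop (s : List Char) (i : Nat) : String :=
  if h : i + pvMarker.length ≤ s.length then
    if ((i == 0 || (PySem.List.pyGet? s ((i : Int) - 1)).getD ' ' == '/')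
        && PySem.List.slice s (some (i : Int)) (some ((i : Int) + (pvMarker.length : Int))) == pvMarker) then
      let rest := PySem.List.slice s (some ((i : Int) + (pvMarker.length : Int))) none
      let j := PySem.Chars.find rest ['/']
      if j == -1 then String.ofList rest
      else String.ofList (PySem.List.slice rest none (some j))
    else bLoop s (i + 1)
  else ""
termination_by s.length - i
decreasing_by
  have : 0 < pvMarker.length := by decide
  omega

def get_id_from_extension_link_py_alt (ext_link : String) : String :=
  bLoop ext_link.toList 0

-- ===== PRECONDITION & SPEC =====
def Spec_get_id_from_extension_link_py (ext_link : String) (out : String) : Prop := out = get_id_from_extension_link_py_alt ext_link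
instance (ext_link : String) (out : String) : Decidable (Spec_get_id_from_extension_link_py ext_link out) := by unfold Spec_get_id_from_extension_link_py; infer_instance

-- ===== CLAIM (what is proved, stated in full; the proofs are below) =====
def Claim_equal_get_id_from_extension_link_py : Prop := ∀ (ext_link : String), Dom_get_id_from_extension_link_py ext_link → Spec_get_id_from_extension_link_py ext_link (get_id_from_extension_link_py ext_link)

-- ===== LEMMAS AND PROOFS =====

-- Reference recursion for the A side: first window a::b::c with a='extension', b='service'.
def rfind : List String → String
  | a :: b :: c :: t => if a == "extension" && b == "service" then c else rfind (b :: c :: t)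
  | _ => ""

-- split('/') as a plain structural recursion.
def splitSlash : List Char → List (List Char)
  | [] => [[]]
  | c :: t =>
    if c = '/' then [] :: splitSlash t
    else
      match splitSlash t with
      | s :: ss => (c :: s) :: ss
      | [] => [[c]]

def headcons (p : List Char) : List (List Char) → List (List Char)
  | [] => [p]
  | s :: ss => (p ++ s) :: ss

-- the value Source B returns once the marker is found, as a function of the remainder
def tailSeg (rest : List Char) : String :=
  let j := PySem.Chars.find rest ['/']
  if j == -1 then String.ofList rest
  else String.ofList (PySem.List.slice rest none (some j))

-- Reference recursion for the B side: char-by-char scan with a boundary flag.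
def cfindB : Bool → List Char → String
  | b, c :: t =>
    if b && pvMarker.isPrefixOf (c :: t) then tailSeg ((c :: t).drop pvMarker.length)
    else cfindB (c == '/') t
  | _, [] => ""

theorem rfind_short (l : List String) (h : l.length ≤ 2) : rfind l = "" := by
  match l with
  | [] => rfl
  | [a] => rfl
  | [a, b] => rfl
  | a :: b :: c :: t => simp at h

theorem getD_at (segs : List String) (ind k : Nat) (h : ind + k < segs.length) :
    (PySem.List.pyGet? segs ((ind : Int) + k)).getD "" = segs[ind + k] := by
  have : (ind : Int) + k = ((ind + k : Nat) : Int) := by push_cast; ring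
  rw [this, PySem.List.pyGet?_natCast, List.getElem?_eq_getElem h]
  rfl

theorem aLoop_eq_rfind (segs : List String) (ind : Nat) :
    aLoop segs ind = rfind (segs.drop ind) := by
  by_cases h : ind < segs.length
  · rw [aLoop, if_pos h]
    have ih := aLoop_eq_rfind segs (ind + 1)
    have hdrop : segs.drop ind = segs[ind] :: segs.drop (ind + 1) :=
      List.drop_eq_getElem_cons h
    by_cases h3 : ind < segs.length - 2
    · have ha := getD_at segs ind 0 (by omega)
      have hb := getD_at segs ind 1 (by omega)
      have hc := getD_at segs ind 2 (by omega)
      simp only [Nat.cast_zero, add_zero, Nat.cast_one, Nat.cast_ofNat] at ha hb hc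
      have hd2 : segs.drop (ind + 1) = segs[ind + 1] :: segs.drop (ind + 2) :=
        List.drop_eq_getElem_cons (by omega)
      have hd3 : segs.drop (ind + 2) = segs[ind + 2] :: segs.drop (ind + 3) :=
        List.drop_eq_getElem_cons (by omega)
      rw [hdrop, hd2, hd3, rfind, ha, hb, hc]
      simp only [h3, decide_true, Bool.and_true]
      by_cases hcond : (segs[ind] == "extension" && segs[ind + 1] == "service") = true
      · rw [if_pos hcond, if_pos hcond]
      · rw [if_neg hcond, if_neg hcond, ih, hd2, hd3]
    · have hfalse : (decide (ind < segs.length - 2)) = false := by simp [h3]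
      simp only [hfalse, Bool.and_false, Bool.false_and, Bool.false_eq_true, if_false]
      rw [ih, rfind_short _ (by simp; omega), rfind_short _ (by simp; omega)]
  · rw [aLoop, if_neg h, List.drop_eq_nil_of_le (by omega)]
    rfl
termination_by segs.length - ind

theorem splitSlash_ne_nil (l : List Char) : splitSlash l ≠ [] := by
  match l with
  | [] => simp [splitSlash]
  | c :: t =>
    by_cases hc : c = '/'
    · simp [splitSlash, hc]
    · have := splitSlash_ne_nil t
      cases hs : splitSlash t with
      | nil => exact absurd hs this
      | cons u us => simp [splitSlash, hc, hs]

-- fuel lemma for PySem's splitOn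
theorem go_eq (l : List Char) : ∀ (fuel : Nat) (cur : List Char) (acc : List (List Char)),
    l.length < fuel →
    PySem.Chars.splitOn.go ['/'] fuel l cur acc
      = acc.reverse ++ headcons cur.reverse (splitSlash l) := by
  induction l with
  | nil =>
    intro fuel cur acc hf
    match fuel with
    | f + 1 => simp [PySem.Chars.splitOn.go, splitSlash, headcons]
  | cons c t ih =>
    intro fuel cur acc hf
    match fuel, hf with
    | f + 1, hf =>
      by_cases hc : c = '/'
      · have hpre : List.isPrefixOf ['/'] (c :: t) = true := by
          simp [List.isPrefixOf, hc]
        rw [PySem.Chars.splitOn.go, hpre]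
        simp only [if_true]
        have hlen : List.drop (['/'] : List Char).length (c :: t) = t := by simp
        rw [hlen, ih f [] (cur.reverse :: acc) (by simp at hf ⊢; omega)]
        cases hs : splitSlash t with
        | nil => exact absurd hs (splitSlash_ne_nil t)
        | cons u us => simp [splitSlash, hc, hs, headcons]
      · have hpre : List.isPrefixOf ['/'] (c :: t) = false := by
          simp [List.isPrefixOf]
          intro h; exact hc h.symm
        rw [PySem.Chars.splitOn.go, hpre]
        simp only [Bool.false_eq_true, if_false]
        rw [ih f (c :: cur) acc (by simp at hf ⊢; omega)]
        cases hs : splitSlash t with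
        | nil => exact absurd hs (splitSlash_ne_nil t)
        | cons u us => simp [splitSlash, hc, hs, headcons]

theorem split_eq (s : String) :
    (PySem.Str.split? s "/").getD [] = (splitSlash s.toList).map String.ofList := by
  have hsep : ("/" : String).toList = ['/'] := rfl
  rw [PySem.Str.split?, hsep]
  rw [show PySem.Chars.split? s.toList ['/'] = some (PySem.Chars.splitOn s.toList ['/']) from rfl]
  rw [show PySem.Chars.splitOn s.toList ['/']
        = PySem.Chars.splitOn.go ['/'] (s.toList.length + 1) s.toList [] [] from rfl]
  rw [go_eq s.toList (s.toList.length + 1) [] [] (by omega)]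
  cases hs : splitSlash s.toList with
  | nil => exact absurd hs (splitSlash_ne_nil s.toList)
  | cons u us => simp [headcons]

theorem splitSlash_append (seg r : List Char) (h : '/' ∉ seg) :
    splitSlash (seg ++ '/' :: r) = seg :: splitSlash r := by
  induction seg with
  | nil => simp [splitSlash]
  | cons c cs ih =>
    have hc : c ≠ '/' := by intro hc; exact h (hc ▸ List.mem_cons_self ..)
    have hcs : '/' ∉ cs := fun hm => h (List.mem_cons_of_mem _ hm)
    rw [List.cons_append, splitSlash]
    simp only [hc, if_false]
    rw [ih hcs]

-- inversion: the shape of l from the shape of splitSlash l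
theorem splitSlash_inv (l s0 : List Char) (ss : List (List Char))
    (h : splitSlash l = s0 :: ss) :
    '/' ∉ s0 ∧ (ss = [] → l = s0) ∧
      (∀ s1 ss', ss = s1 :: ss' → ∃ r, l = s0 ++ '/' :: r ∧ splitSlash r = s1 :: ss') := by
  induction l generalizing s0 ss with
  | nil =>
    simp [splitSlash] at h
    obtain ⟨h1, h2⟩ := h
    subst h1; subst h2
    refine ⟨by simp, fun _ => rfl, fun s1 ss' h => by simp at h⟩
  | cons c t ih =>
    by_cases hc : c = '/'
    · rw [splitSlash, if_pos hc] at h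
      obtain ⟨h1, h2⟩ := List.cons.inj h
      subst h1
      refine ⟨by simp, fun he => absurd (he ▸ h2) (splitSlash_ne_nil t), ?_⟩
      intro s1 ss' he
      exact ⟨t, by simp [hc], by rw [h2, he]⟩
    · rw [splitSlash, if_neg hc] at h
      cases hs : splitSlash t with
      | nil => exact absurd hs (splitSlash_ne_nil t)
      | cons u us =>
        rw [hs] at h
        obtain ⟨h1, h2⟩ := List.cons.inj h
        obtain ⟨hu1, hu2, hu3⟩ := ih u us hs
        subst h1; subst h2
        refine ⟨?_, ?_, ?_⟩
        · intro hm
          rcases List.mem_cons.mp hm with hm | hm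
          · exact hc hm.symm
          · exact hu1 hm
        · intro he; rw [hu2 he]
        · intro s1 ss' he
          obtain ⟨r, hr1, hr2⟩ := hu3 s1 ss' he
          exact ⟨r, by rw [hr1]; simp, hr2⟩

theorem takeWhile_eq_take_of (r : List Char) (j : Nat) (h1 : j < r.length)
    (h2 : r[j] = '/') (h3 : ∀ i, (hi : i < j) → r[i]'(by omega) ≠ '/') :
    r.takeWhile (· ≠ '/') = r.take j := by
  induction r generalizing j with
  | nil => simp at h1
  | cons c t ih =>
    match j with
    | 0 =>
      simp at h2
      simp [List.takeWhile, h2]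
    | j + 1 =>
      have hc : c ≠ '/' := h3 0 (by omega)
      have hstep : t.takeWhile (· ≠ '/') = t.take j := by
        refine ih j (by simpa using h1) (by simpa using h2) ?_
        intro i hi
        have := h3 (i + 1) (by omega)
        simpa using this
      rw [List.take_succ_cons, List.takeWhile_cons, if_pos (by simp [hc]), hstep]

theorem singleton_prefix_getElem (r : List Char) (i : Nat) (hi : i < r.length) :
    ['/'] <+: r.drop i ↔ r[i] = '/' := by
  rw [List.drop_eq_getElem_cons hi]
  constructor
  · rintro ⟨tl, htl⟩
    rw [List.singleton_append] at htl
    exact ((List.cons.inj htl).1).symm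
  · intro h
    exact ⟨r.drop (i + 1), by rw [h]; rfl⟩

theorem tailSeg_eq (r : List Char) : tailSeg r = String.ofList (r.takeWhile (· ≠ '/')) := by
  have hbody : tailSeg r = (if (PySem.Chars.find r ['/'] == -1) = true then String.ofList r
      else String.ofList (PySem.List.slice r none (some (PySem.Chars.find r ['/'])))) := rfl
  rw [hbody]
  by_cases hneg : PySem.Chars.find r ['/'] = -1
  · have hni : ¬ (['/'] : List Char) <:+: r := (PySem.Chars.find_eq_neg_one_iff r ['/']).mp hneg
    have hnm : '/' ∉ r := by
      intro hm
      obtain ⟨i, hi, hei⟩ := List.getElem_of_mem hm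
      exact hni (List.IsInfix.trans ((singleton_prefix_getElem r i hi).mpr hei).isInfix
        (List.drop_suffix i r).isInfix)
    have : r.takeWhile (· ≠ '/') = r := by
      rw [List.takeWhile_eq_self_iff]
      intro x hx
      simp
      intro he; exact hnm (he ▸ hx)
    rw [if_pos (by simp [hneg]), this]
  · have hge : 0 ≤ PySem.Chars.find r ['/'] := by
      have := PySem.Chars.neg_one_le_find r ['/']
      omega
    obtain ⟨hpre, hmin⟩ := PySem.Chars.find_spec (s := r) (sub := ['/']) hge
    set j : Nat := (PySem.Chars.find r ['/']).toNat with hj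
    have hjlen : j < r.length := by
      obtain ⟨tl, htl⟩ := hpre
      have := congrArg List.length htl
      simp at this
      omega
    have hcj : r[j] = '/' := by
      rw [← singleton_prefix_getElem r j hjlen]
      exact hpre
    have hbefore : ∀ i, (hi : i < j) → r[i]'(by omega) ≠ '/' := by
      intro i hi hei
      exact hmin i hi ((singleton_prefix_getElem r i (by omega)).mpr hei)
    rw [if_neg (by simp [hneg])]
    rw [PySem.List.slice_to r hge, ← hj]
    rw [takeWhile_eq_take_of r j hjlen hcj hbefore]

theorem rfind_cons (a : String) (X : List String)
    (h : ∀ b c t, X = b :: c :: t → ¬(a = "extension" ∧ b = "service")) :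
    rfind (a :: X) = rfind X := by
  match X with
  | [] => rfl
  | [b] => rfl
  | b :: c :: t =>
    have hcond : (a == "extension" && b == "service") = false := by
      have := h b c t rfl
      simp only [Bool.and_eq_false_iff, beq_eq_false_iff_ne, ne_eq]
      by_cases ha : a = "extension"
      · right; intro hb; exact this ⟨ha, hb⟩
      · left; exact ha
    rw [rfind, hcond]
    simp

theorem cfindB_false (t : List Char) :
    cfindB false t = cfindB true ((t.dropWhile (· ≠ '/')).tail) := by
  induction t with
  | nil => rfl
  | cons c t ih =>
    rw [cfindB]
    simp only [Bool.false_and, Bool.false_eq_true, if_false]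
    by_cases hc : c = '/'
    · subst hc
      simp [List.dropWhile]
    · have : (c == '/') = false := by simp [hc]
      rw [this, ih]
      simp [List.dropWhile, hc]

theorem cfindB_short (b : Bool) (l : List Char) (h : l.length < pvMarker.length) :
    cfindB b l = "" := by
  induction l generalizing b with
  | nil => rfl
  | cons c t ih =>
    rw [cfindB]
    have hpre : pvMarker.isPrefixOf (c :: t) = false := by
      by_contra hx
      have : pvMarker.isPrefixOf (c :: t) = true := by
        cases hy : pvMarker.isPrefixOf (c :: t) <;> simp_all
      have := (List.isPrefixOf_iff_prefix.mp this).length_le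
      omega
    rw [hpre]
    simp only [Bool.and_false, Bool.false_eq_true, if_false]
    exact ih (c == '/') (by simp at h ⊢; omega)

theorem splitSlash_head (r : List Char) :
    ∃ ss, splitSlash r = (r.takeWhile (· ≠ '/')) :: ss := by
  induction r with
  | nil => exact ⟨[], rfl⟩
  | cons c t ih =>
    by_cases hc : c = '/'
    · subst hc
      refine ⟨splitSlash t, ?_⟩
      simp [splitSlash, List.takeWhile]
    · obtain ⟨ss, hss⟩ := ih
      refine ⟨ss, ?_⟩
      rw [splitSlash, if_neg hc, hss]
      simp [List.takeWhile, hc]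

theorem ofList_inj (a b : List Char) (h : String.ofList a = String.ofList b) : a = b := by
  have := congrArg String.toList h
  simpa [String.toList_ofList] using this

theorem cfindB_eq_rfind (l : List Char) :
    cfindB true l = rfind ((splitSlash l).map String.ofList) := by
  match l with
  | [] => rfl
  | c :: t =>
    by_cases hp : pvMarker.isPrefixOf (c :: t) = true
    · -- marker at the front: both sides return the next segment
      obtain ⟨r2, hr2⟩ := List.isPrefixOf_iff_prefix.mp hp
      rw [cfindB, hp]
      simp only [Bool.true_and, if_true]
      have hdrop : (c :: t).drop pvMarker.length = r2 := by
        rw [← hr2, List.drop_left]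
      rw [hdrop, tailSeg_eq]
      have hsplit : splitSlash (c :: t)
          = ("extension".toList) :: ("service".toList) :: splitSlash r2 := by
        rw [← hr2]
        have hshape : pvMarker ++ r2
            = "extension".toList ++ '/' :: ("service".toList ++ '/' :: r2) := rfl
        rw [hshape, splitSlash_append _ _ (by decide),
            splitSlash_append _ _ (by decide)]
      rw [hsplit]
      obtain ⟨ss2, hss2⟩ := splitSlash_head r2
      rw [hss2]
      simp only [List.map_cons]
      rw [show String.ofList "extension".toList = "extension" from rfl,
          show String.ofList "service".toList = "service" from rfl]
      rw [rfind]
      simp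
    · have hpf : pvMarker.isPrefixOf (c :: t) = false := by
        cases hy : pvMarker.isPrefixOf (c :: t) <;> simp_all
      rw [cfindB, hpf]
      simp only [Bool.and_false, Bool.false_eq_true, if_false]
      by_cases hc : c = '/'
      · subst hc
        have hsl : splitSlash ('/' :: t) = [] :: splitSlash t := by
          rw [splitSlash, if_pos rfl]
        rw [show (('/' : Char) == '/') = true from rfl, hsl, List.map_cons]
        rw [rfind_cons _ _ (by
          intro b2 c2 t2 _ hcc
          exact absurd hcc.1 (by decide))]
        exact cfindB_eq_rfind t
      · have hcb : (c == '/') = false := by simp [hc]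
        rw [hcb, cfindB_false]
        cases hs : splitSlash t with
        | nil => exact absurd hs (splitSlash_ne_nil t)
        | cons u us =>
          obtain ⟨hu1, hu2, hu3⟩ := splitSlash_inv t u us hs
          have hsl : splitSlash (c :: t) = (c :: u) :: us := by
            rw [splitSlash, if_neg hc, hs]
          rw [hsl]
          cases hus : us with
          | nil =>
            -- no further slash in t: both sides are ''
            have ht : t = u := hu2 hus
            have hdw : t.dropWhile (· ≠ '/') = [] := by
              rw [List.dropWhile_eq_nil_iff]
              intro x hx
              simp only [ne_eq, decide_eq_true_eq]
              intro hxx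
              exact hu1 (hxx ▸ (ht ▸ hx))
            rw [hdw]
            simp only [List.tail_nil, List.map_cons, List.map_nil]
            rw [show cfindB true [] = "" from rfl, rfind_short _ (by simp)]
          | cons s1 ss' =>
            obtain ⟨r, hr1, hr2⟩ := hu3 s1 ss' hus
            have hdw : t.dropWhile (· ≠ '/') = '/' :: r := by
              rw [hr1]
              have haux : ∀ (v : List Char), '/' ∉ v →
                  (v ++ '/' :: r).dropWhile (· ≠ '/') = '/' :: r := by
                intro v hv
                induction v with
                | nil => simp
                | cons a as ih2 =>
                  have ha : a ≠ '/' := fun haa => hv (haa ▸ List.mem_cons_self ..)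
                  rw [List.cons_append, List.dropWhile_cons_of_pos (by simp [ha])]
                  exact ih2 (fun hm => hv (List.mem_cons_of_mem _ hm))
              exact haux u hu1
            rw [hdw]
            simp only [List.tail_cons]
            rw [cfindB_eq_rfind r, hr2, List.map_cons]
            refine (rfind_cons _ _ ?_).symm
            intro b2 c2 t2 hmap hcc
            obtain ⟨hb1, hb2⟩ := hcc
            -- head segment is 'extension' and next is 'service' with a third: marker was a prefix
            have hcu : c :: u = "extension".toList :=
              ofList_inj _ _ (by rw [hb1]; decide)
            obtain ⟨hm1, hm2⟩ := List.cons.inj hmap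
            have hs1 : s1 = "service".toList :=
              ofList_inj _ _ (by rw [hm1, hb2]; decide)
            -- ss' is nonempty, so r = s1 ++ '/' :: r3: the marker was a prefix after all
            cases hss' : ss' with
            | nil => rw [hss', List.map_nil] at hm2; exact (List.cons_ne_nil _ _) hm2.symm
            | cons s2 ss2 =>
              obtain ⟨_, _, hv3⟩ := splitSlash_inv r s1 ss' hr2
              obtain ⟨r3, hr31, _⟩ := hv3 s2 ss2 hss'
              apply hp
              rw [List.isPrefixOf_iff_prefix]
              have key : pvMarker ++ r3 = (c :: u) ++ '/' :: (s1 ++ '/' :: r3) := by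
                rw [hcu, hs1]; rfl
              refine ⟨r3, ?_⟩
              rw [key, hr1, hr31]
              simp
termination_by l.length
decreasing_by
  · simp
  · have hlen := congrArg List.length hr1
    simp at hlen ⊢
    omega

theorem bLoop_eq_cfindB (s : List Char) (i : Nat) :
    bLoop s i = cfindB (i == 0 || (PySem.List.pyGet? s ((i : Int) - 1)).getD ' ' == '/') (s.drop i) := by
  by_cases h : i + pvMarker.length ≤ s.length
  · rw [bLoop, dif_pos h]
    have hm : 0 < pvMarker.length := by decide
    have hi : i < s.length := by omega
    have hdrop : s.drop i = s[i] :: s.drop (i + 1) := List.drop_eq_getElem_cons hi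
    have hslice : PySem.List.slice s (some (i : Int)) (some ((i : Int) + (pvMarker.length : Int)))
        = (s.drop i).take pvMarker.length := PySem.List.slice_natCast_add s i pvMarker.length
    have hcond : (PySem.List.slice s (some (i : Int)) (some ((i : Int) + (pvMarker.length : Int)))
          == pvMarker) = pvMarker.isPrefixOf (s.drop i) := by
      rw [hslice]
      by_cases hpre : pvMarker <+: s.drop i
      · have h1 : (s.drop i).take pvMarker.length = pvMarker :=
          (List.prefix_iff_eq_take.mp hpre).symm
        have h3 : pvMarker.isPrefixOf (s.drop i) = true := by
          rw [List.isPrefixOf_iff_prefix]; exact hpre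
        rw [h1, h3]
        simp
      · have h1 : (s.drop i).take pvMarker.length ≠ pvMarker := by
          intro hx
          exact hpre (List.prefix_iff_eq_take.mpr hx.symm)
        have h3 : pvMarker.isPrefixOf (s.drop i) = false := by
          cases hy : pvMarker.isPrefixOf (s.drop i) <;> simp_all [List.isPrefixOf_iff_prefix]
        rw [h3]
        simp [h1]
    rw [hcond]
    cases hflag : ((i == 0 || (PySem.List.pyGet? s ((i : Int) - 1)).getD ' ' == '/')
        && pvMarker.isPrefixOf (s.drop i)) with
    | true =>
      rw [if_pos rfl]
      conv_rhs => rw [hdrop]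
      rw [cfindB, ← hdrop, hflag]
      simp only [if_true]
      have hrest : PySem.List.slice s (some ((i : Int) + (pvMarker.length : Int))) none
          = (s.drop i).drop pvMarker.length := by
        have hcast : (i : Int) + (pvMarker.length : Int) = ((i + pvMarker.length : Nat) : Int) := by
          push_cast; ring
        rw [hcast, PySem.List.slice_from_natCast, List.drop_drop]
      rw [hrest]
      rfl
    | false =>
      rw [if_neg (by simp)]
      rw [bLoop_eq_cfindB s (i + 1)]
      conv_rhs => rw [hdrop]
      rw [cfindB, ← hdrop, hflag]
      simp only [Bool.false_eq_true, if_false]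
      congr 1
      have h0 : ((i + 1 : Nat) == 0) = false := by simp
      have hcast : ((i + 1 : Nat) : Int) - 1 = ((i : Nat) : Int) := by push_cast; ring
      rw [h0, hcast, PySem.List.pyGet?_natCast, List.getElem?_eq_getElem hi]
      simp
  · rw [bLoop, dif_neg h]
    rw [cfindB_short _ _ (by
      have h18 : pvMarker.length = 18 := rfl
      simp [h18] at h ⊢
      omega)]
termination_by s.length - i
decreasing_by
  have : 0 < pvMarker.length := by decide
  omega

-- ===== VERDICT (by name: the statement is the Claim_ definition above) =====
theorem get_id_from_extension_link_py_spec : Claim_equal_get_id_from_extension_link_py := by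
  intro ext_link _
  unfold Spec_get_id_from_extension_link_py get_id_from_extension_link_py get_id_from_extension_link_py_alt
  rw [aLoop_eq_rfind, List.drop_zero, split_eq, bLoop_eq_cfindB]
  simp only [Nat.cast_zero]
  rw [List.drop_zero]
  have : ((0 == 0 : Bool) || (PySem.List.pyGet? ext_link.toList ((0 : Int) - 1)).getD ' ' == '/') = true := by
    simp
  rw [this, cfindB_eq_rfind]
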